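-- pv_equiv track=rewrite | github.com/akx/pino | pino/image_refs.py | qualify_image_ref
-- ===== SOURCE A (Python) =====
-- KNOWN_SKOPEO_TRANSPORTS = {
--     "containers-storage",
--     "dir",
--     "docker",
--     "docker-archive",
--     "docker-daemon",
--     "oci",
--     "oci-archive",
--     "ostree",
--     "sif",
--     "tarball",
-- }
--
-- def qualify_image_ref(image_ref: str) -> str:
--     # If the image smells like a Skopeo-transport-prefixed thing, assume the user knows what they're doing
--     if any(
--         image_ref.startswith(f"{transport}:") for transport in KNOWN_SKOPEO_TRANSPORTS
--     ):
--         return image_ref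
--     # If it ends with a .tar, assume the user means a local Docker tarball
--     if image_ref.endswith(".tar"):
--         return f"docker-archive:{image_ref}"
--     # Otherwise, assume it's a local docker image
--     return f"docker-daemon:{image_ref}"
-- ===== SOURCE B (Python) =====
-- KNOWN_SKOPEO_TRANSPORTS = {
--     "containers-storage",
--     "dir",
--     "docker",
--     "docker-archive",
--     "docker-daemon",
--     "oci",
--     "oci-archive",
--     "ostree",
--     "sif",
--     "tarball",
-- }
--
-- def _is_transport_prefixed(image_ref):
--     # Run all prefix tests in lockstep: one left-to-right pass over the string,
--     # narrowing a set of still-viable transport suffixes at each character.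
--     candidates = KNOWN_SKOPEO_TRANSPORTS
--     for ch in image_ref:
--         if ch == ":" and "" in candidates:
--             return True
--         candidates = {t[1:] for t in candidates if t[:1] == ch}
--         if not candidates:
--             return False
--     return False
--
-- def qualify_image_ref(image_ref: str) -> str:
--     if _is_transport_prefixed(image_ref):
--         return image_ref
--     if image_ref.endswith(".tar"):
--         return f"docker-archive:{image_ref}"
--     return f"docker-daemon:{image_ref}"
-- ===== Notes on version B (the rewrite author's own statement) =====
-- stated objective: alternative
-- what changed: B inverts the loop structure: instead of one startswith scan per transport, a single left-to-right pass over the string narrows a set of still-viable transport suffixes character by character (a lockstep prefix automaton), bailing out as soon as the set empties.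
import Mathlib
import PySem

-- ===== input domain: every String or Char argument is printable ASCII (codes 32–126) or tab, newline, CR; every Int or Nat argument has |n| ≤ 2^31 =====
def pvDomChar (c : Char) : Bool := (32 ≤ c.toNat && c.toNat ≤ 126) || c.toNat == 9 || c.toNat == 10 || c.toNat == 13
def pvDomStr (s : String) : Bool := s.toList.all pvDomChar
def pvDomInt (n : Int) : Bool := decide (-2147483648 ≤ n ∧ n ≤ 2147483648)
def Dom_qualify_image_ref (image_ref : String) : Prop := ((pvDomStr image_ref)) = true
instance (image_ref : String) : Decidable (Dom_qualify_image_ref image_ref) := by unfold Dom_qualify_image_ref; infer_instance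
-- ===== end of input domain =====

-- B inverts A's loop structure: instead of a startswith scan per transport, a single
-- left-to-right pass over the string narrows a set of still-viable transport suffixes
-- one character at a time (alternative; a lockstep/parallel prefix automaton).

def KNOWN_SKOPEO_TRANSPORTS : PySem.Set String := PySem.Set.ofList
  ["containers-storage", "dir", "docker", "docker-archive", "docker-daemon",
   "oci", "oci-archive", "ostree", "sif", "tarball"]

-- ===== PORT A =====
def qualify_image_ref (image_ref : String) : String :=
  if KNOWN_SKOPEO_TRANSPORTS.any (fun transport => PySem.Str.startswith image_ref (transport ++ ":")) then
    image_ref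
  else if PySem.Str.endswith image_ref ".tar" then
    "docker-archive:" ++ image_ref
  else
    "docker-daemon:" ++ image_ref

-- ===== PORT B =====
-- the loop of _is_transport_prefixed: candidates carried as a PySem.Set of char lists
-- (each element the chars of one still-viable transport suffix); the set comprehension
-- '{t[1:] for t in candidates if t[:1] == ch}' is Set.ofList of the filterMap.
def isTransportPrefixedLoop (cands : PySem.Set (List Char)) : List Char → Bool
  | [] => false
  | c :: rest =>
    if c = ':' ∧ cands.contains ([] : List Char) then true
    else
      let cands' : PySem.Set (List Char) := PySem.Set.ofList
        (cands.filterMap (fun t =>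
          match t with
          | [] => none
          | a :: t' => if a = c then some t' else none))
      if cands' = [] then false else isTransportPrefixedLoop cands' rest

def qualify_image_ref_alt (image_ref : String) : String :=
  if isTransportPrefixedLoop (PySem.Set.ofList (KNOWN_SKOPEO_TRANSPORTS.map String.toList)) image_ref.toList then
    image_ref
  else if PySem.Str.endswith image_ref ".tar" then
    "docker-archive:" ++ image_ref
  else
    "docker-daemon:" ++ image_ref

-- ===== PRECONDITION & SPEC =====
def Spec_qualify_image_ref (image_ref : String) (out : String) : Prop := out = qualify_image_ref_alt image_ref
instance (image_ref : String) (out : String) : Decidable (Spec_qualify_image_ref image_ref out) := by unfold Spec_qualify_image_ref; infer_instance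

-- ===== CLAIM (what is proved, stated in full; the proofs are below) =====
def Claim_equal_qualify_image_ref : Prop := ∀ (image_ref : String), Dom_qualify_image_ref image_ref → Spec_qualify_image_ref image_ref (qualify_image_ref image_ref)

-- ===== LEMMAS AND PROOFS =====

-- the loop accepts from candidate set cands iff some candidate followed by ':' is a prefix
theorem walk_iff (cs : List Char) : ∀ (cands : List (List Char)),
    isTransportPrefixedLoop cands cs = true ↔ ∃ t ∈ cands, (t ++ [':']) <+: cs := by
  induction cs with
  | nil => intro cands; simp [isTransportPrefixedLoop]
  | cons c rest ih =>
    intro cands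
    simp only [isTransportPrefixedLoop]
    by_cases h1 : c = ':' ∧ PySem.Set.contains cands ([] : List Char) = true
    · rw [if_pos h1]
      refine iff_of_true rfl ?_
      exact ⟨[], by simpa [PySem.Set.contains, List.contains_iff_mem] using h1.2, by simp [h1.1]⟩
    · rw [if_neg h1]
      have hmem : ∀ t' : List Char,
          (t' ∈ PySem.Set.ofList (cands.filterMap (fun t =>
            match t with
            | [] => none
            | a :: t'' => if a = c then some t'' else none))) ↔ (c :: t') ∈ cands := by
        intro t'
        rw [PySem.Set.mem_ofList, List.mem_filterMap]
        constructor
        · rintro ⟨t, htm, hf⟩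
          match t with
          | [] => simp at hf
          | a :: t'' =>
            simp only at hf
            split at hf
            · next ha => cases hf; exact ha ▸ htm
            · cases hf
        · intro h; exact ⟨c :: t', h, by simp⟩
      have hrhs : (∃ t ∈ cands, (t ++ [':']) <+: c :: rest) ↔
          (∃ t' ∈ PySem.Set.ofList (cands.filterMap (fun t =>
            match t with
            | [] => none
            | a :: t'' => if a = c then some t'' else none)), (t' ++ [':']) <+: rest) := by
        constructor
        · rintro ⟨t, htm, hp⟩
          match t with
          | [] =>
            simp only [List.nil_append, List.cons_prefix_cons] at hp
            exact absurd ⟨hp.1.symm, by simpa [PySem.Set.contains, List.contains_iff_mem] using htm⟩ h1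
          | a :: t' =>
            simp only [List.cons_append, List.cons_prefix_cons] at hp
            exact ⟨t', (hmem t').mpr (hp.1 ▸ htm), hp.2⟩
        · rintro ⟨t', htm, hp⟩
          exact ⟨c :: t', (hmem t').mp htm, by simpa [List.cons_prefix_cons] using hp⟩
      split
      · next he =>
        rw [hrhs, he]
        simp
      · rw [ih, hrhs]

theorem cond_eq (s : String) :
    (KNOWN_SKOPEO_TRANSPORTS.any (fun transport => PySem.Str.startswith s (transport ++ ":"))) =
    (isTransportPrefixedLoop (PySem.Set.ofList (KNOWN_SKOPEO_TRANSPORTS.map String.toList)) s.toList) := by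
  rw [Bool.eq_iff_iff, walk_iff]
  simp only [List.any_eq_true, PySem.Str.startswith_eq, PySem.Chars.startswith_iff,
    String.toList_append, PySem.Set.mem_ofList, List.mem_map]
  have hcolon : (":" : String).toList = [':'] := rfl
  constructor
  · rintro ⟨t, htm, hsw⟩
    exact ⟨t.toList, ⟨t, htm, rfl⟩, by rwa [hcolon] at hsw⟩
  · rintro ⟨w, ⟨t, htm, rfl⟩, hp⟩
    exact ⟨t, htm, by rwa [hcolon]⟩

-- ===== VERDICT (by name: the statement is the Claim_ definition above) =====
theorem qualify_image_ref_spec : Claim_equal_qualify_image_ref := by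
  intro s _
  unfold Spec_qualify_image_ref qualify_image_ref qualify_image_ref_alt
  rw [cond_eq]
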